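-- pv_equiv track=rewrite | github.com/NingLiu80/Mario_Kart_League_Matchmaker | MarioKartLeague.py | reduceNumberOfTimesToPlay
-- ===== SOURCE A (Python) =====
-- def reduceNumberOfTimesToPlay(listOfMatches, cross_matrix):
--     # check for each match
--     for match in listOfMatches:
--         # the players if they still have to play and decrement
--         for playerIdx in match:
--             if(cross_matrix[playerIdx][playerIdx]>0):
--                 cross_matrix[playerIdx][playerIdx] -= 1
--             if(cross_matrix[playerIdx][playerIdx]>0):
--                 cross_matrix[playerIdx][playerIdx] -= 1
--     return cross_matrix
-- ===== SOURCE B (Python) =====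
-- def reduceNumberOfTimesToPlay(listOfMatches, cross_matrix):
--     # Aggregate pass: count how often each player index occurs over all matches.
--     counts = {}
--     for match in listOfMatches:
--         for playerIdx in match:
--             counts[playerIdx] = counts.get(playerIdx, 0) + 1
--     # One closed-form clamped update per distinct player: k occurrences each
--     # subtract up to 2 from a positive diagonal entry, clamping at 0; a
--     # non-positive entry is never touched.
--     for playerIdx, k in counts.items():
--         v = cross_matrix[playerIdx][playerIdx]
--         if v > 0:
--             cross_matrix[playerIdx][playerIdx] = max(v - 2 * k, 0)
--     return cross_matrix
-- ===== Notes on version B (the rewrite author's own statement) =====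
-- stated objective: alternative
-- what changed: B first aggregates all player occurrences into one counter dict and then performs a single closed-form clamped update max(v-2k,0) per distinct player, instead of A's per-occurrence pair of guarded decrements inside the nested loops.
import Mathlib
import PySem

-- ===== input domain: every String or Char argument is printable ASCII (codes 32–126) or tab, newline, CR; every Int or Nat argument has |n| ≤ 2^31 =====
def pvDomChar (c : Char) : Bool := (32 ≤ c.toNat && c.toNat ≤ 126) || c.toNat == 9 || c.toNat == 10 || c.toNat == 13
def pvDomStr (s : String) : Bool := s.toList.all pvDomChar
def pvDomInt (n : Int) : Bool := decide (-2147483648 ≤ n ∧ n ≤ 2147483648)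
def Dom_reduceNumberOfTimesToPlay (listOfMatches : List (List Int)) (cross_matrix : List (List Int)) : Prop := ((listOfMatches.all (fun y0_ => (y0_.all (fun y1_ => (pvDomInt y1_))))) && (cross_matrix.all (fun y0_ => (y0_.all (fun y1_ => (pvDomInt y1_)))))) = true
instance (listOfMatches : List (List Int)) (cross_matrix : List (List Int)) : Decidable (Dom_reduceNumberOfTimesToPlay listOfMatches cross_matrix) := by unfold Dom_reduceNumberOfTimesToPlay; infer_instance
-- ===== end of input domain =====

-- B aggregates occurrences into a counter and applies one clamped closed-form update per
-- distinct player instead of A's per-occurrence guarded decrements (objective: alternative).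
-- Both Pythons mutate cross_matrix in place and return it; the theorems are about the return value.

-- ===== PORT A =====
-- cross_matrix[p][p] as a read (exact Python indexing via pyGetD; only used under the
-- guard 'value > 0', and an out-of-range read is excluded by Pre_).
def pvDiagGet (m : List (List Int)) (p : Int) : Int :=
  PySem.List.pyGetD (PySem.List.pyGetD m p []) p 0

-- cross_matrix[p][p] = v (exact Python indexing via pySetD; out of range excluded by Pre_)
def pvDiagSet (m : List (List Int)) (p : Int) (v : Int) : List (List Int) :=
  PySem.List.pySetD m p (PySem.List.pySetD (PySem.List.pyGetD m p []) p v)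

def reduceNumberOfTimesToPlay (listOfMatches : List (List Int)) (cross_matrix : List (List Int)) : List (List Int) :=
  listOfMatches.foldl (fun acc mtch =>
    mtch.foldl (fun acc2 playerIdx =>
      let acc3 := if pvDiagGet acc2 playerIdx > 0 then pvDiagSet acc2 playerIdx (pvDiagGet acc2 playerIdx - 1) else acc2
      if pvDiagGet acc3 playerIdx > 0 then pvDiagSet acc3 playerIdx (pvDiagGet acc3 playerIdx - 1) else acc3) acc) cross_matrix

-- ===== PORT B =====
def reduceNumberOfTimesToPlay_alt (listOfMatches : List (List Int)) (cross_matrix : List (List Int)) : List (List Int) :=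
  let counts := listOfMatches.foldl (fun d mtch =>
    mtch.foldl (fun d playerIdx => d.insert playerIdx (d.getD playerIdx 0 + 1)) d) (PySem.Dict.mk ([] : List (Int × Int)))
  counts.items.foldl (fun m pk =>
    let v := pvDiagGet m pk.1
    if v > 0 then pvDiagSet m pk.1 (max (v - 2 * pk.2) 0) else m) cross_matrix

-- ===== PRECONDITION & SPEC =====
-- Pre_ excludes exactly the inputs on which A raises IndexError: some playerIdx in some
-- match is not a valid Python index into cross_matrix or into its selected row.
def Pre_reduceNumberOfTimesToPlay (listOfMatches : List (List Int)) (cross_matrix : List (List Int)) : Prop :=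
  ∀ mtch ∈ listOfMatches, ∀ p ∈ mtch,
    PySem.Raise.InRange cross_matrix.length p ∧
    PySem.Raise.InRange (PySem.List.pyGetD cross_matrix p []).length p
instance (listOfMatches : List (List Int)) (cross_matrix : List (List Int)) : Decidable (Pre_reduceNumberOfTimesToPlay listOfMatches cross_matrix) := by unfold Pre_reduceNumberOfTimesToPlay; infer_instance
def pvWitness_reduceNumberOfTimesToPlay : List (List Int) × List (List Int) := ([[0]], [[3]])

def Spec_reduceNumberOfTimesToPlay (listOfMatches : List (List Int)) (cross_matrix : List (List Int)) (out : List (List Int)) : Prop := out = reduceNumberOfTimesToPlay_alt listOfMatches cross_matrix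
instance (listOfMatches : List (List Int)) (cross_matrix : List (List Int)) (out : List (List Int)) : Decidable (Spec_reduceNumberOfTimesToPlay listOfMatches cross_matrix out) := by unfold Spec_reduceNumberOfTimesToPlay; infer_instance

-- ===== CLAIM (what is proved, stated in full; the proofs are below) =====
def Claim_equal_reduceNumberOfTimesToPlay : Prop := ∀ (listOfMatches : List (List Int)) (cross_matrix : List (List Int)), Dom_reduceNumberOfTimesToPlay listOfMatches cross_matrix → Pre_reduceNumberOfTimesToPlay listOfMatches cross_matrix → Spec_reduceNumberOfTimesToPlay listOfMatches cross_matrix (reduceNumberOfTimesToPlay listOfMatches cross_matrix)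

-- ===== LEMMAS AND PROOFS =====

theorem pvIdx_lt {n : Nat} {p : Int} {i : Nat} (h : PySem.List.pyIdx? n p = some i) : i < n := by
  unfold PySem.List.pyIdx? at h
  split_ifs at h <;> simp_all <;> omega

theorem pvIdx_zero (p : Int) : PySem.List.pyIdx? 0 p = none := by
  unfold PySem.List.pyIdx?
  split_ifs with h1 h2 h3 <;> first | rfl | (exfalso; omega)

-- the clamped-subtraction family: one guarded decrement is pvHfun 1, k occurrences are pvHfun (2k)
def pvHfun (a v : Int) : Int := if v > 0 then max (v - a) 0 else v

-- proof-side normal form of one read-modify-write of the diagonal cell of p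
def pvMD (m : List (List Int)) (p : Int) (h : Int → Int) : List (List Int) :=
  match PySem.List.pyIdx? m.length p with
  | none => m
  | some i =>
    match PySem.List.pyIdx? (m.getD i []).length p with
    | none => m
    | some j => m.set i ((m.getD i []).set j (h ((m.getD i []).getD j 0)))

def pvStep (a : Int) (m : List (List Int)) (p : Int) : List (List Int) := pvMD m p (pvHfun a)

def pvIncr : List (Int × Int) → Int → List (Int × Int)
  | [], p => [(p, 1)]
  | (q, k) :: t, p => if q = p then (q, k + 1) :: t else (q, k) :: pvIncr t p

def pvBApply (m : List (List Int)) (l : List (Int × Int)) : List (List Int) :=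
  l.foldl (fun m pk => pvStep (2 * pk.2) m pk.1) m

theorem pvMD_none1 {m : List (List Int)} {p : Int} {h : Int → Int}
    (h1 : PySem.List.pyIdx? m.length p = none) : pvMD m p h = m := by
  simp only [pvMD, h1]

theorem pvMD_none2 {m : List (List Int)} {p : Int} {h : Int → Int} {i : Nat}
    (h1 : PySem.List.pyIdx? m.length p = some i)
    (h2 : PySem.List.pyIdx? (m.getD i []).length p = none) : pvMD m p h = m := by
  simp only [pvMD, h1, h2]

theorem pvMD_some {m : List (List Int)} {p : Int} {h : Int → Int} {i j : Nat}
    (h1 : PySem.List.pyIdx? m.length p = some i)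
    (h2 : PySem.List.pyIdx? (m.getD i []).length p = some j) :
    pvMD m p h = m.set i ((m.getD i []).set j (h ((m.getD i []).getD j 0))) := by
  simp only [pvMD, h1, h2]

theorem pvGetDset_self {α : Type} (d : α) {l : List α} {i : Nat} (h : i < l.length) (v : α) :
    (l.set i v).getD i d = v := by
  simp [List.getD_eq_getElem?_getD, List.getElem?_set, h]

theorem pvGetDset_ne {α : Type} (d : α) {l : List α} {i x : Nat} (h : i ≠ x) (v : α) :
    (l.set i v).getD x d = l.getD x d := by
  simp [List.getD_eq_getElem?_getD, List.getElem?_set, h]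

theorem pvSetSelf {α : Type} {l : List α} {i : Nat} (h : i < l.length) : l.set i l[i] = l := by
  apply List.ext_getElem?
  intro x
  by_cases hix : i = x
  · subst hix; simp [List.getElem?_set, h, List.getElem?_eq_getElem h]
  · simp [List.getElem?_set, hix]

theorem pvMD_length (m : List (List Int)) (p : Int) (h : Int → Int) :
    (pvMD m p h).length = m.length := by
  rcases h1 : PySem.List.pyIdx? m.length p with _ | i
  · rw [pvMD_none1 h1]
  · rcases h2 : PySem.List.pyIdx? (m.getD i []).length p with _ | j
    · rw [pvMD_none2 h1 h2]
    · rw [pvMD_some h1 h2]; simp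

theorem pvMD_rowlen (m : List (List Int)) (p : Int) (h : Int → Int) (x : Nat) :
    ((pvMD m p h).getD x []).length = (m.getD x []).length := by
  rcases h1 : PySem.List.pyIdx? m.length p with _ | i
  · rw [pvMD_none1 h1]
  · rcases h2 : PySem.List.pyIdx? (m.getD i []).length p with _ | j
    · rw [pvMD_none2 h1 h2]
    · rw [pvMD_some h1 h2]
      have hi : i < m.length := pvIdx_lt h1
      by_cases hx : i = x
      · subst hx; rw [pvGetDset_self _ hi]; simp
      · rw [pvGetDset_ne _ hx]

theorem pvHfun_comp {a b : Int} (ha : 0 ≤ a) (hb : 0 ≤ b) (v : Int) :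
    pvHfun a (pvHfun b v) = pvHfun (a + b) v := by
  unfold pvHfun
  rcases le_total (v - b) 0 with h | h <;> rcases le_total (v - (a + b)) 0 with h' | h' <;>
    simp [max_def] <;> split_ifs <;> omega

theorem pvHfun_comm {a b : Int} (ha : 0 ≤ a) (hb : 0 ≤ b) (v : Int) :
    pvHfun a (pvHfun b v) = pvHfun b (pvHfun a v) := by
  rw [pvHfun_comp ha hb, pvHfun_comp hb ha, Int.add_comm]

theorem pvStep_add {a b : Int} (ha : 0 ≤ a) (hb : 0 ≤ b) (m : List (List Int)) (p : Int) :
    pvStep a (pvStep b m p) p = pvStep (a + b) m p := by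
  unfold pvStep
  rcases h1 : PySem.List.pyIdx? m.length p with _ | i
  · rw [pvMD_none1 h1, pvMD_none1 h1, pvMD_none1 h1]
  · rcases h2 : PySem.List.pyIdx? (m.getD i []).length p with _ | j
    · rw [pvMD_none2 h1 h2, pvMD_none2 h1 h2, pvMD_none2 h1 h2]
    · have hi : i < m.length := pvIdx_lt h1
      have hj : j < (m.getD i []).length := pvIdx_lt h2
      rw [pvMD_some (h := pvHfun b) h1 h2, pvMD_some (h := pvHfun (a + b)) h1 h2]
      have hrowL : (m.set i ((m.getD i []).set j (pvHfun b ((m.getD i []).getD j 0)))).getD i []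
          = (m.getD i []).set j (pvHfun b ((m.getD i []).getD j 0)) := pvGetDset_self _ hi _
      rw [pvMD_some (h := pvHfun a)
        (by simpa using h1)
        (by rw [hrowL]; simpa using h2)]
      rw [hrowL, pvGetDset_self _ hj, List.set_set, List.set_set, pvHfun_comp ha hb]

theorem pvStep_comm {a b : Int} (ha : 0 ≤ a) (hb : 0 ≤ b) (m : List (List Int)) (p q : Int) :
    pvStep a (pvStep b m q) p = pvStep b (pvStep a m p) q := by
  unfold pvStep
  rcases h1p : PySem.List.pyIdx? m.length p with _ | i
  · rw [pvMD_none1 h1p, pvMD_none1 (h := pvHfun a) (by rw [pvMD_length]; exact h1p)]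
  rcases h2p : PySem.List.pyIdx? (m.getD i []).length p with _ | j
  · rw [pvMD_none2 h1p h2p,
      pvMD_none2 (h := pvHfun a) (by rw [pvMD_length]; exact h1p) (by rw [pvMD_rowlen]; exact h2p)]
  rcases h1q : PySem.List.pyIdx? m.length q with _ | i'
  · rw [pvMD_none1 h1q, pvMD_none1 (h := pvHfun b) (by rw [pvMD_length]; exact h1q)]
  rcases h2q : PySem.List.pyIdx? (m.getD i' []).length q with _ | j'
  · rw [pvMD_none2 h1q h2q,
      pvMD_none2 (h := pvHfun b) (by rw [pvMD_length]; exact h1q) (by rw [pvMD_rowlen]; exact h2q)]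
  have hi : i < m.length := pvIdx_lt h1p
  have hj : j < (m.getD i []).length := pvIdx_lt h2p
  have hi' : i' < m.length := pvIdx_lt h1q
  have hj' : j' < (m.getD i' []).length := pvIdx_lt h2q
  rw [pvMD_some (h := pvHfun b) h1q h2q, pvMD_some (h := pvHfun a) h1p h2p]
  by_cases hii : i' = i
  · subst hii
    have hrowL : (m.set i' ((m.getD i' []).set j' (pvHfun b ((m.getD i' []).getD j' 0)))).getD i' []
        = (m.getD i' []).set j' (pvHfun b ((m.getD i' []).getD j' 0)) := pvGetDset_self _ hi' _
    have hrowR : (m.set i' ((m.getD i' []).set j (pvHfun a ((m.getD i' []).getD j 0)))).getD i' []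
        = (m.getD i' []).set j (pvHfun a ((m.getD i' []).getD j 0)) := pvGetDset_self _ hi' _
    rw [pvMD_some (h := pvHfun a) (by simpa using h1p) (by rw [hrowL]; simpa using h2p),
        pvMD_some (h := pvHfun b) (by simpa using h1q) (by rw [hrowR]; simpa using h2q)]
    rw [hrowL, hrowR, List.set_set, List.set_set]
    by_cases hjj : j' = j
    · subst hjj
      rw [pvGetDset_self _ hj', pvGetDset_self _ hj']
      rw [List.set_set, List.set_set, pvHfun_comm ha hb]
    · rw [pvGetDset_ne _ hjj, pvGetDset_ne _ (Ne.symm hjj)]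
      rw [List.set_comm _ _ hjj]
  · have hrowL : (m.set i' ((m.getD i' []).set j' (pvHfun b ((m.getD i' []).getD j' 0)))).getD i []
        = m.getD i [] := pvGetDset_ne _ hii _
    have hrowR : (m.set i ((m.getD i []).set j (pvHfun a ((m.getD i []).getD j 0)))).getD i' []
        = m.getD i' [] := pvGetDset_ne _ (Ne.symm hii) _
    rw [pvMD_some (h := pvHfun a) (by simpa using h1p) (by rw [hrowL]; exact h2p),
        pvMD_some (h := pvHfun b) (by simpa using h1q) (by rw [hrowR]; exact h2q)]
    rw [hrowL, hrowR, List.set_comm _ _ hii]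

-- PySem.List.pyGetD through the common index resolution (exact: pyGetD = pyGet? with default)
theorem pvPyGetD_eq {α : Type} (xs : List α) (i : Int) (d : α) :
    PySem.List.pyGetD xs i d = ((PySem.List.pyIdx? xs.length i).bind (fun k => xs[k]?)).getD d := by
  simp [PySem.List.pyGetD, PySem.List.pyGet?]

-- the guarded read-test-write of the ports is exactly pvMD with a guarded function
theorem pvGuard_eq (m : List (List Int)) (p : Int) (f : Int → Int) :
    (if pvDiagGet m p > 0 then pvDiagSet m p (f (pvDiagGet m p)) else m)
      = pvMD m p (fun v => if v > 0 then f v else v) := by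
  rcases h1 : PySem.List.pyIdx? m.length p with _ | i
  · have hrow : PySem.List.pyGetD m p [] = [] := by simp [pvPyGetD_eq, h1]
    have hget : pvDiagGet m p = 0 := by
      unfold pvDiagGet; rw [hrow]; simp [pvPyGetD_eq, pvIdx_zero]
    simp [hget, pvMD_none1 h1]
  · have hi : i < m.length := pvIdx_lt h1
    have hrow : PySem.List.pyGetD m p [] = m.getD i [] := by
      simp [pvPyGetD_eq, h1, List.getD_eq_getElem?_getD]
    rcases h2 : PySem.List.pyIdx? (m.getD i []).length p with _ | j
    · have hget : pvDiagGet m p = 0 := by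
        unfold pvDiagGet; rw [hrow, pvPyGetD_eq, h2]; rfl
      simp [hget, pvMD_none2 h1 h2]
    · have hj : j < (m.getD i []).length := pvIdx_lt h2
      have hget : pvDiagGet m p = (m.getD i []).getD j 0 := by
        unfold pvDiagGet
        rw [hrow, pvPyGetD_eq, h2, List.getD_eq_getElem?_getD]
        rfl
      have hset : ∀ w, pvDiagSet m p w = m.set i ((m.getD i []).set j w) := by
        intro w
        unfold pvDiagSet
        rw [hrow]
        simp only [PySem.List.pySetD, PySem.List.pySet?, h1, h2, Option.map_some, Option.getD_some]
      rw [pvMD_some h1 h2, hget]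
      by_cases hv : (m.getD i []).getD j 0 > 0
      · rw [if_pos hv, if_pos hv, hset]
      · rw [if_neg hv, if_neg hv]
        have hvj : (m.getD i []).getD j 0 = (m.getD i [])[j] := by
          rw [List.getD_eq_getElem?_getD, List.getElem?_eq_getElem hj]; rfl
        have hmi : m.getD i [] = m[i] := by
          rw [List.getD_eq_getElem?_getD, List.getElem?_eq_getElem hi]; rfl
        rw [hvj, pvSetSelf hj, hmi, pvSetSelf hi]

theorem pvStep2_eq (m : List (List Int)) (p : Int) :
    (let acc3 := if pvDiagGet m p > 0 then pvDiagSet m p (pvDiagGet m p - 1) else m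
     if pvDiagGet acc3 p > 0 then pvDiagSet acc3 p (pvDiagGet acc3 p - 1) else acc3)
      = pvStep 2 m p := by
  show (if pvDiagGet (if pvDiagGet m p > 0 then pvDiagSet m p (pvDiagGet m p - 1) else m) p > 0 then _ else _) = _
  rw [pvGuard_eq m p (· - 1), pvGuard_eq _ p (· - 1)]
  have h1 : (fun v => if v > 0 then v - 1 else v) = pvHfun 1 := by
    funext v; unfold pvHfun; split_ifs <;> simp [max_def] <;> omega
  rw [h1]
  show pvStep 1 (pvStep 1 m p) p = pvStep 2 m p
  rw [pvStep_add (by norm_num) (by norm_num)]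
  norm_num

theorem pvStepB_eq (m : List (List Int)) (pk : Int × Int) :
    (let v := pvDiagGet m pk.1
     if v > 0 then pvDiagSet m pk.1 (max (v - 2 * pk.2) 0) else m) = pvStep (2 * pk.2) m pk.1 := by
  show (if pvDiagGet m pk.1 > 0 then pvDiagSet m pk.1 (max (pvDiagGet m pk.1 - 2 * pk.2) 0) else m) = _
  rw [pvGuard_eq m pk.1 (fun v => max (v - 2 * pk.2) 0)]
  rfl

-- pull one pvStep through a fold of pvSteps with positive counts
theorem pvPull {a : Int} (ha : 0 ≤ a) (t : List (Int × Int)) (ht : ∀ pk ∈ t, 1 ≤ pk.2)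
    (m : List (List Int)) (p : Int) :
    pvStep a (pvBApply m t) p = pvBApply (pvStep a m p) t := by
  induction t generalizing m with
  | nil => rfl
  | cons q t ih =>
    have hq : 1 ≤ q.2 := ht q (by simp)
    have ht' : ∀ pk ∈ t, 1 ≤ pk.2 := fun pk hpk => ht pk (by simp [hpk])
    show pvStep a (pvBApply (pvStep (2 * q.2) m q.1) t) p = pvBApply (pvStep (2 * q.2) (pvStep a m p) q.1) t
    rw [ih ht', pvStep_comm ha (by omega)]

theorem pvIncr_vals {l : List (Int × Int)} (hl : ∀ pk ∈ l, 1 ≤ pk.2) (p : Int) :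
    ∀ pk ∈ pvIncr l p, 1 ≤ pk.2 := by
  induction l with
  | nil => intro pk hpk; simp [pvIncr] at hpk; simp [hpk]
  | cons q t ih =>
    intro pk hpk
    have hq : 1 ≤ q.2 := hl q (by simp)
    have ht : ∀ pk ∈ t, 1 ≤ pk.2 := fun pk hpk => hl pk (by simp [hpk])
    rcases q with ⟨qk, qv⟩
    simp only [pvIncr] at hpk
    split_ifs at hpk with hqp
    · rcases List.mem_cons.1 hpk with h | h
      · subst h; simpa using by omega
      · exact ht _ h
    · rcases List.mem_cons.1 hpk with h | h
      · subst h; exact hq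
      · exact ih ht _ h

theorem pvS {l : List (Int × Int)} (hl : ∀ pk ∈ l, 1 ≤ pk.2) (m : List (List Int)) (p : Int) :
    pvBApply m (pvIncr l p) = pvStep 2 (pvBApply m l) p := by
  induction l generalizing m with
  | nil => simp [pvIncr, pvBApply, pvStep]
  | cons q t ih =>
    have ht : ∀ pk ∈ t, 1 ≤ pk.2 := fun pk hpk => hl pk (by simp [hpk])
    rcases q with ⟨qk, qv⟩
    have hq : (1 : Int) ≤ qv := hl (qk, qv) (by simp)
    by_cases hqp : qk = p
    · subst hqp
      show pvBApply m (pvIncr ((qk, qv) :: t) qk) = _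
      simp only [pvIncr, if_pos rfl]
      show pvBApply (pvStep (2 * (qv + 1)) m qk) t = pvStep 2 (pvBApply (pvStep (2 * qv) m qk) t) qk
      have h2 : (2 : Int) + 2 * qv = 2 * (qv + 1) := by ring
      rw [pvPull (by norm_num) t ht, pvStep_add (by norm_num) (by omega), h2]
    · simp only [pvIncr, if_neg hqp]
      show pvBApply (pvStep (2 * qv) m qk) (pvIncr t p) = pvStep 2 (pvBApply (pvStep (2 * qv) m qk) t) p
      exact ih ht _

theorem pvG (occs : List Int) (l : List (Int × Int)) (hl : ∀ pk ∈ l, 1 ≤ pk.2) (m : List (List Int)) :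
    pvBApply m (occs.foldl pvIncr l) = occs.foldl (pvStep 2) (pvBApply m l) := by
  induction occs generalizing l with
  | nil => rfl
  | cons p occs ih =>
    show pvBApply m (occs.foldl pvIncr (pvIncr l p)) = occs.foldl (pvStep 2) (pvStep 2 (pvBApply m l) p)
    rw [ih (pvIncr l p) (pvIncr_vals hl p), pvS hl]

theorem pvIncr_keys (l : List (Int × Int)) (p : Int) :
    (pvIncr l p).map Prod.fst
      = if p ∈ l.map Prod.fst then l.map Prod.fst else l.map Prod.fst ++ [p] := by
  induction l with
  | nil => simp [pvIncr]
  | cons q t ih =>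
    rcases q with ⟨qk, qv⟩
    by_cases hqp : qk = p
    · subst hqp; simp [pvIncr]
    · simp only [pvIncr, if_neg hqp, List.map_cons, List.mem_cons, Ne.symm hqp, false_or, ih]
      by_cases hm : p ∈ t.map Prod.fst <;> simp [hm]

theorem pvIncr_keys_nodup {l : List (Int × Int)} (hl : (l.map Prod.fst).Nodup) (p : Int) :
    ((pvIncr l p).map Prod.fst).Nodup := by
  rw [pvIncr_keys]
  split_ifs with hm
  · exact hl
  · simp [List.nodup_append, hl]
    intro a x hax h
    subst h
    exact hm (List.mem_map_of_mem hax)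

theorem pvItems_incr {l : List (Int × Int)} (hl : (l.map Prod.fst).Nodup) (p : Int) :
    ((PySem.Dict.mk l).insert p ((PySem.Dict.mk l).getD p 0 + 1)).items = pvIncr l p := by
  induction l with
  | nil =>
    simp [PySem.Dict.insert, PySem.Dict.contains, PySem.Dict.getD, PySem.Dict.get?, pvIncr]
  | cons q t ih =>
    rcases q with ⟨qk, qv⟩
    simp only [List.map_cons, List.nodup_cons] at hl
    obtain ⟨hq, ht⟩ := hl
    by_cases hqp : qk = p
    · subst hqp
      have hmap : t.map (fun x => if x.1 = qk then (qk, qv + 1) else x) = t := by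
        have hcong : ∀ x ∈ t, (if x.1 = qk then (qk, qv + 1) else x) = id x := by
          intro x hx
          have hne : x.1 ≠ qk := fun h => hq (h ▸ List.mem_map_of_mem hx)
          simp [hne]
        rw [List.map_congr_left hcong, List.map_id]
      simp [PySem.Dict.insert, PySem.Dict.contains, PySem.Dict.getD, PySem.Dict.get?, pvIncr]
      exact hmap
    · have hbeq : (qk == p) = false := by simpa using hqp
      have ihp := ih ht
      by_cases hc : t.any (fun x => x.1 == p)
      · simp [PySem.Dict.insert, PySem.Dict.contains, PySem.Dict.getD, PySem.Dict.get?,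
          pvIncr, hbeq, hqp, hc] at ihp ⊢
        exact ihp
      · simp [PySem.Dict.insert, PySem.Dict.contains, PySem.Dict.getD, PySem.Dict.get?,
          pvIncr, hbeq, hqp, hc] at ihp ⊢
        exact ihp

theorem pvDictFold (occs : List Int) (l : List (Int × Int)) (hl : (l.map Prod.fst).Nodup) :
    (occs.foldl (fun d p => d.insert p (d.getD p 0 + 1)) (PySem.Dict.mk l)).items
      = occs.foldl pvIncr l := by
  induction occs generalizing l with
  | nil => rfl
  | cons p occs ih =>
    show (occs.foldl _ ((PySem.Dict.mk l).insert p ((PySem.Dict.mk l).getD p 0 + 1))).items = _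
    have h1 : (PySem.Dict.mk l).insert p ((PySem.Dict.mk l).getD p 0 + 1) = PySem.Dict.mk (pvIncr l p) := by
      have h2 := pvItems_incr hl p
      cases h : (PySem.Dict.mk l).insert p ((PySem.Dict.mk l).getD p 0 + 1)
      simp_all [PySem.Dict.items]
    rw [h1]
    exact ih (pvIncr l p) (pvIncr_keys_nodup hl p)

-- ===== VERDICT (by name: the statement is the Claim_ definition above) =====
theorem reduceNumberOfTimesToPlay_spec : Claim_equal_reduceNumberOfTimesToPlay := by
  intro lom cm _ _
  show reduceNumberOfTimesToPlay lom cm = reduceNumberOfTimesToPlay_alt lom cm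
  have hA : reduceNumberOfTimesToPlay lom cm = lom.flatten.foldl (pvStep 2) cm := by
    unfold reduceNumberOfTimesToPlay
    rw [List.foldl_flatten]
    congr 1
    funext acc mtch
    congr 1
    funext acc2 playerIdx
    exact pvStep2_eq acc2 playerIdx
  have hB : reduceNumberOfTimesToPlay_alt lom cm
      = pvBApply cm ((lom.foldl (fun d mtch => mtch.foldl (fun d playerIdx => d.insert playerIdx (d.getD playerIdx 0 + 1)) d) (PySem.Dict.mk ([] : List (Int × Int)))).items) := by
    show ((lom.foldl (fun d mtch => mtch.foldl (fun d playerIdx => d.insert playerIdx (d.getD playerIdx 0 + 1)) d) (PySem.Dict.mk ([] : List (Int × Int)))).items.foldl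
        (fun m pk => let v := pvDiagGet m pk.1
                     if v > 0 then pvDiagSet m pk.1 (max (v - 2 * pk.2) 0) else m) cm) = _
    unfold pvBApply
    congr 1
    funext m pk
    exact pvStepB_eq m pk
  have hc : (lom.foldl (fun d mtch => mtch.foldl (fun d playerIdx => d.insert playerIdx (d.getD playerIdx 0 + 1)) d) (PySem.Dict.mk ([] : List (Int × Int)))).items
      = lom.flatten.foldl pvIncr [] := by
    rw [← List.foldl_flatten]
    exact pvDictFold lom.flatten [] (by simp)
  rw [hA, hB, hc, pvG lom.flatten [] (by simp) cm]
  rfl
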